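-- pv_equiv track=rewrite | github.com/Kmaina32/Hacking-Tools | hacking_tools/web_security/injection_tester.py | encode_html_entities
-- ===== SOURCE A (Python) =====
-- def encode_html_entities(user_input: str) -> str:
--     """Encode input as HTML entities."""
--     entities = {
--         '&': '&amp;',
--         '<': '&lt;',
--         '>': '&gt;',
--         '"': '&quot;',
--         "'": '&#x27;',
--     }
--     return ''.join(entities.get(c, c) for c in user_input)
-- ===== SOURCE B (Python) =====
-- def encode_html_entities(user_input: str) -> str:
--     """Encode input as HTML entities."""
--     out = user_input.replace('&', '&amp;')
--     out = out.replace('<', '&lt;')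
--     out = out.replace('>', '&gt;')
--     out = out.replace('"', '&quot;')
--     out = out.replace("'", '&#x27;')
--     return out
-- ===== Notes on version B (the rewrite author's own statement) =====
-- stated objective: idiomatic
-- what changed: Replaces the single per-character dict-lookup generator-join pass with a chain of whole-string str.replace scans, escaping '&' first so entities introduced by later replacements are never double-escaped.
import Mathlib
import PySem

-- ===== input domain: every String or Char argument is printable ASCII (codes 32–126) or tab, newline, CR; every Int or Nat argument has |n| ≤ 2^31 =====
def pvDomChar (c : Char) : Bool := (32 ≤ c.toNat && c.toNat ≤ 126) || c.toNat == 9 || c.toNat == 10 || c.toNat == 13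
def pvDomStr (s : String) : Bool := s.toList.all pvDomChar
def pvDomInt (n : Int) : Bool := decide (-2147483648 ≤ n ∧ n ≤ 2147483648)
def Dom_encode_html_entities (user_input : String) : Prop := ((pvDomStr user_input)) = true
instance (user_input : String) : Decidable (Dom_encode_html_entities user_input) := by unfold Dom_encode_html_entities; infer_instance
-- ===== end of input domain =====

-- B rewrites the single per-character dict-lookup join pass as a chain of str.replace scans ('&' first); idiomatic, same results.

-- ===== PORT A =====
-- the dict literal `entities`
def pvEntities : PySem.Dict String String :=
  PySem.Dict.ofList [("&", "&amp;"), ("<", "&lt;"), (">", "&gt;"), ("\"", "&quot;"), ("'", "&#x27;")]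

def encode_html_entities (user_input : String) : String :=
  PySem.Str.join "" (user_input.toList.map (fun c => pvEntities.getD (String.ofList [c]) (String.ofList [c])))

-- ===== PORT B =====
def encode_html_entities_alt (user_input : String) : String :=
  let out := PySem.Str.replace user_input "&" "&amp;"
  let out := PySem.Str.replace out "<" "&lt;"
  let out := PySem.Str.replace out ">" "&gt;"
  let out := PySem.Str.replace out "\"" "&quot;"
  let out := PySem.Str.replace out "'" "&#x27;"
  out

-- ===== PRECONDITION & SPEC =====
def Spec_encode_html_entities (user_input : String) (out : String) : Prop := out = encode_html_entities_alt user_input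
instance (user_input : String) (out : String) : Decidable (Spec_encode_html_entities user_input out) := by unfold Spec_encode_html_entities; infer_instance

-- ===== CLAIM (what is proved, stated in full; the proofs are below) =====
def Claim_equal_encode_html_entities : Prop := ∀ (user_input : String), Dom_encode_html_entities user_input → Spec_encode_html_entities user_input (encode_html_entities user_input)

-- ===== LEMMAS AND PROOFS =====

-- single-character replace is a per-character flatMap (helper for the go loop, fuel = length)
theorem replace_go_single (o : Char) (new : List Char) (l acc : List Char) :
    PySem.Chars.replace.go [o] new l.length l acc
      = acc.reverse ++ l.flatMap (fun c => if c = o then new else [c]) := by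
  induction l generalizing acc with
  | nil => simp [PySem.Chars.replace.go]
  | cons c t ih =>
      by_cases h : c = o
      · subst h
        simp [PySem.Chars.replace.go, List.isPrefixOf, ih]
      · have hb : ([o].isPrefixOf (c :: t)) = false := by
          simp [List.isPrefixOf]
          exact fun he => (h he.symm).elim
        simp [PySem.Chars.replace.go, hb, ih, h]

theorem replace_single (s : List Char) (o : Char) (new : List Char) :
    PySem.Chars.replace s [o] new = s.flatMap (fun c => if c = o then new else [c]) := by
  simpa using replace_go_single o new s []

-- '' .join with empty separator is flatten
theorem join_empty (l : List (List Char)) : PySem.Chars.join [] l = l.flatten := by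
  simp [PySem.Chars.join, List.intercalate]
  induction l with
  | nil => rfl
  | cons a t ih => cases t <;> simp_all [List.intersperse]

-- the per-character encoding both programs compute
def pvEnc (c : Char) : List Char :=
  if c = '&' then "&amp;".toList
  else if c = '<' then "&lt;".toList
  else if c = '>' then "&gt;".toList
  else if c = '"' then "&quot;".toList
  else if c = '\'' then "&#x27;".toList
  else [c]

theorem dict_lookup_eq (c : Char) :
    (pvEntities.getD (String.ofList [c]) (String.ofList [c])).toList = pvEnc c := by
  by_cases h1 : c = '&'; · subst h1; decide
  by_cases h2 : c = '<'; · subst h2; decide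
  by_cases h3 : c = '>'; · subst h3; decide
  by_cases h4 : c = '"'; · subst h4; decide
  by_cases h5 : c = '\''; · subst h5; decide
  have key : ∀ (d : Char), c ≠ d → (String.ofList [d] == String.ofList [c]) = false := by
    intro d hd
    rw [beq_eq_false_iff_ne]
    intro h
    have := congrArg String.toList h
    simp at this
    exact hd this.symm
  have hE : pvEntities = PySem.Dict.mk
      [("&", "&amp;"), ("<", "&lt;"), (">", "&gt;"), ("\"", "&quot;"), ("'", "&#x27;")] := by decide
  rw [hE, PySem.Dict.getD]
  rw [PySem.Dict.get?_mk_cons, PySem.Dict.get?_mk_cons, PySem.Dict.get?_mk_cons,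
      PySem.Dict.get?_mk_cons, PySem.Dict.get?_mk_cons]
  rw [show ("&" : String) = String.ofList ['&'] from rfl,
      show ("<" : String) = String.ofList ['<'] from rfl,
      show (">" : String) = String.ofList ['>'] from rfl,
      show ("\"" : String) = String.ofList ['"'] from rfl,
      show ("'" : String) = String.ofList ['\''] from rfl]
  rw [key '&' h1, key '<' h2, key '>' h3, key '"' h4, key '\'' h5]
  simp [pvEnc, PySem.Dict.get?, h1, h2, h3, h4, h5]

theorem pvEnc_compose (c : Char) :
    ((if c = '&' then "&amp;".toList else [c]).flatMap (fun d =>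
      (if d = '<' then "&lt;".toList else [d]).flatMap (fun d =>
        (if d = '>' then "&gt;".toList else [d]).flatMap (fun d =>
          (if d = '"' then "&quot;".toList else [d]).flatMap (fun d =>
            if d = '\'' then "&#x27;".toList else [d]))))) = pvEnc c := by
  by_cases h1 : c = '&'; · subst h1; decide
  by_cases h2 : c = '<'; · subst h2; decide
  by_cases h3 : c = '>'; · subst h3; decide
  by_cases h4 : c = '"'; · subst h4; decide
  by_cases h5 : c = '\''; · subst h5; decide
  simp [pvEnc, h1, h2, h3, h4, h5]

theorem alt_toList (s : String) :
    (encode_html_entities_alt s).toList = s.toList.flatMap pvEnc := by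
  show (PySem.Str.replace (PySem.Str.replace (PySem.Str.replace (PySem.Str.replace
      (PySem.Str.replace s "&" "&amp;") "<" "&lt;") ">" "&gt;") "\"" "&quot;") "'" "&#x27;").toList
      = s.toList.flatMap pvEnc
  rw [PySem.Str.toList_replace, PySem.Str.toList_replace, PySem.Str.toList_replace,
      PySem.Str.toList_replace, PySem.Str.toList_replace]
  show PySem.Chars.replace (PySem.Chars.replace (PySem.Chars.replace (PySem.Chars.replace
      (PySem.Chars.replace s.toList ['&'] "&amp;".toList) ['<'] "&lt;".toList) ['>'] "&gt;".toList)
      ['"'] "&quot;".toList) ['\''] "&#x27;".toList = s.toList.flatMap pvEnc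
  rw [replace_single, replace_single, replace_single, replace_single, replace_single]
  simp only [List.flatMap_assoc]
  exact List.flatMap_congr (fun c _ => pvEnc_compose c)

theorem a_toList (s : String) :
    (encode_html_entities s).toList = s.toList.flatMap pvEnc := by
  unfold encode_html_entities
  rw [PySem.Str.toList_join]
  rw [show ("" : String).toList = [] from rfl, join_empty]
  rw [List.flatMap_def]
  refine congrArg List.flatten ?_
  rw [List.map_map]
  exact List.map_congr_left (fun c _ => dict_lookup_eq c)

-- ===== VERDICT (by name: the statement is the Claim_ definition above) =====
theorem encode_html_entities_spec : Claim_equal_encode_html_entities := by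
  intro s _
  show encode_html_entities s = encode_html_entities_alt s
  apply String.ext
  show (encode_html_entities s).toList = (encode_html_entities_alt s).toList
  rw [a_toList, alt_toList]
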